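-- pv_equiv track=rewrite | github.com/sairam0424/Geeks-For-Geeks-POTD | POTD_02_10_24/Solution.py | rotateDelete
-- ===== SOURCE A (Python) =====
-- def rotateDelete(arr):
--     # code here
--     k = 1
--     while len(arr) > 1:
--         # Rotate
--         arr.insert(0, arr.pop(-1))
--
--         # Remove kth element
--         arr.pop(-k)
--         k += 1
--
--         if k > len(arr):
--             break
--
--     return arr[0]
-- ===== SOURCE B (Python) =====
-- def rotateDelete(arr):
--     # Index-tracking: record the (length, k) schedule of A's loop, then map the
--     # surviving front position backwards through each rotate+delete step; O(n), no mutation.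
--     chain = []
--     n, k = len(arr), 1
--     while n > 1:
--         chain.append((n, k))
--         n -= 1
--         k += 1
--         if k > n:
--             break
--     pos = 0
--     for n, k in reversed(chain):
--         r = pos if pos < n - k else pos + 1
--         pos = n - 1 if r == 0 else r - 1
--     return arr[pos]
-- ===== Notes on version B (the rewrite author's own statement) =====
-- stated objective: faster
-- what changed: Instead of mutating the list (O(n) insert/pop per step), B records the loop's (length,k) schedule and maps the surviving front index backwards through each rotate+delete step, then returns arr at that index.
import Mathlib
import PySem

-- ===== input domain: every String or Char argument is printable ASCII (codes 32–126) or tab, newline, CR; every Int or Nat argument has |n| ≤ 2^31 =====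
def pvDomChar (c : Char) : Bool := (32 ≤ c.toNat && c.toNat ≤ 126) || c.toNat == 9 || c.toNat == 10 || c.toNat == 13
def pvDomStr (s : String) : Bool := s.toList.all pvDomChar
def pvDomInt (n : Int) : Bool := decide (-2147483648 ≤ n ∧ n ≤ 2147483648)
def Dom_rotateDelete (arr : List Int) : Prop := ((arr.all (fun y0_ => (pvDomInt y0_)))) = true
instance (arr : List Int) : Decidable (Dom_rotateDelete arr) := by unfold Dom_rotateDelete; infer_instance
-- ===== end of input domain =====

-- B replaces A's quadratic list mutation by a linear backward index computation over the
-- loop's (length, k) schedule; equivalence is about the RETURN value only (A mutates arr in place).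

-- helper for the termination proof of the A-port loop (cited by decreasing_by)
theorem pop_getD_lt (xs : List Int) (i : Int) (hx : xs ≠ []) :
    ((PySem.List.pop? xs i).getD (0, [])).2.length < xs.length := by
  rcases h : PySem.List.pop? xs i with _ | r
  · simpa using List.length_pos_of_ne_nil hx
  · have := PySem.List.length_of_pop?_eq_some xs h
    simp only [Option.getD_some]
    omega

-- ===== PORT A =====
-- while len(arr) > 1: arr.insert(0, arr.pop(-1)); arr.pop(-k); k += 1; if k > len(arr): break
def rotateDeleteLoop (arr : List Int) (k : Int) : List Int :=
  if _h : arr.length > 1 then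
    let p1 := (PySem.List.pop? arr (-1)).getD (0, [])    -- .getD: IndexError impossible, arr nonempty here
    let arr1 := PySem.List.insert p1.2 0 p1.1
    let p2 := (PySem.List.pop? arr1 (-k)).getD (0, [])   -- .getD: in range throughout (1 ≤ k ≤ len)
    let arr2 := p2.2
    if k + 1 > (arr2.length : Int) then arr2
    else rotateDeleteLoop arr2 (k + 1)
  else arr
termination_by arr.length
decreasing_by
  have hne : arr ≠ [] := by intro hh; rw [hh] at _h; simp at _h
  have h1 := pop_getD_lt arr (-1) hne
  have h2 := PySem.List.length_insert ((PySem.List.pop? arr (-1)).getD (0, [])).2 0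
    ((PySem.List.pop? arr (-1)).getD (0, [])).1
  have h3 : PySem.List.insert ((PySem.List.pop? arr (-1)).getD (0, [])).2 0
      ((PySem.List.pop? arr (-1)).getD (0, [])).1 ≠ [] := by
    intro hh; rw [hh] at h2; simp at h2
  have h4 := pop_getD_lt (PySem.List.insert ((PySem.List.pop? arr (-1)).getD (0, [])).2 0
    ((PySem.List.pop? arr (-1)).getD (0, [])).1) (-k) h3
  simp only [arr2, p2, arr1, p1] at *
  omega

def rotateDelete (arr : List Int) : Int :=
  PySem.List.pyGetD (rotateDeleteLoop arr 1) 0 0   -- arr[0]; in range on Pre_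

-- ===== PORT B =====
-- the (n, k) schedule of the loop: while n > 1: chain.append((n,k)); n -= 1; k += 1; if k > n: break
def altChain (n k : Int) : List (Int × Int) :=
  if _h : n > 1 then
    (n, k) :: (if k + 1 > n - 1 then [] else altChain (n - 1) (k + 1))
  else []
termination_by n.toNat
decreasing_by omega

-- body of: for n, k in reversed(chain): r = pos if pos < n - k else pos + 1; pos = n - 1 if r == 0 else r - 1
def altStep (pos : Int) (nk : Int × Int) : Int :=
  let r := if pos < nk.1 - nk.2 then pos else pos + 1
  if r = 0 then nk.1 - 1 else r - 1

def rotateDelete_alt (arr : List Int) : Int :=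
  let pos := ((altChain (arr.length : Int) 1).reverse).foldl altStep 0
  PySem.List.pyGetD arr pos 0   -- arr[pos]; in range on Pre_

-- ===== PRECONDITION & SPEC =====
-- Pre_ excludes only the empty list, on which A raises IndexError (arr[0] of []).
def Pre_rotateDelete (arr : List Int) : Prop := arr ≠ []
instance (arr : List Int) : Decidable (Pre_rotateDelete arr) := by unfold Pre_rotateDelete; infer_instance
def pvWitness_rotateDelete : List Int := [3, 1, 4, 1, 5]

def Spec_rotateDelete (arr : List Int) (out : Int) : Prop := out = rotateDelete_alt arr
instance (arr : List Int) (out : Int) : Decidable (Spec_rotateDelete arr out) := by unfold Spec_rotateDelete; infer_instance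

-- ===== CLAIM (what is proved, stated in full; the proofs are below) =====
def Claim_equal_rotateDelete : Prop := ∀ (arr : List Int), Dom_rotateDelete arr → Pre_rotateDelete arr → Spec_rotateDelete arr (rotateDelete arr)

-- ===== LEMMAS AND PROOFS =====

-- recursive form of B's backward index computation
def posR (n k : Int) : Int :=
  if _h : n > 1 then
    altStep (if k + 1 > n - 1 then 0 else posR (n - 1) (k + 1)) (n, k)
  else 0
termination_by n.toNat
decreasing_by omega

theorem altChain_foldl (n k : Int) :
    ((altChain n k).reverse).foldl altStep 0 = posR n k := by
  rw [List.foldl_reverse]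
  induction n, k using altChain.induct with
  | case1 n k h ih =>
    rw [altChain, posR, dif_pos h, dif_pos h]
    by_cases hb : k + 1 > n - 1
    · rw [if_pos hb, if_pos hb]
      simp only [List.foldr_cons, List.foldr_nil]
    · rw [if_neg hb, if_neg hb, List.foldr_cons, ih]
  | case2 n k h =>
    rw [altChain, posR, dif_neg h, dif_neg h]
    simp only [List.foldr_nil]

theorem posR_range (n k : Int) : 1 ≤ n → 0 ≤ posR n k ∧ posR n k < n := by
  induction n, k using posR.induct with
  | case1 n k h1 ih =>
    intro _
    rw [posR, dif_pos h1]
    by_cases hb : k + 1 > n - 1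
    · rw [if_pos hb]
      simp only [altStep]
      split_ifs <;> omega
    · have hrec := ih (by omega)
      rw [if_neg hb]
      simp only [altStep]
      split_ifs <;> omega
  | case2 n k h1 =>
    intro h
    rw [posR, dif_neg h1]
    omega

theorem pop?_neg (xs : List Int) (k : Int) (h1 : 1 ≤ k) (h2 : k ≤ (xs.length : Int)) :
    PySem.List.pop? xs (-k) =
      some (xs.getD (xs.length - k.toNat) 0, xs.eraseIdx (xs.length - k.toNat)) := by
  have hidx : xs.length - k.toNat < xs.length := by omega
  simp only [PySem.List.pop?, PySem.List.pyIdx?, Int.neg_neg]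
  rw [if_neg (by omega), if_pos (by omega)]
  simp [List.getElem?_eq_getElem hidx]

theorem insert_zero (xs : List Int) (v : Int) : PySem.List.insert xs 0 v = v :: xs := by
  simp [PySem.List.insert, PySem.List.sliceIndices]

theorem pyGetD_toNat (xs : List Int) (i : Int) (h : 0 ≤ i) :
    PySem.List.pyGetD xs i 0 = xs.getD i.toNat 0 := by
  simp only [PySem.List.pyGetD, PySem.List.pyGet?, PySem.List.pyIdx?]
  rw [if_pos h]
  by_cases hlt : i < (xs.length : Int)
  · rw [if_pos hlt]
    simp [List.getD]
  · rw [if_neg hlt]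
    simp [List.getD, List.getElem?_eq_none (by omega : xs.length ≤ i.toNat)]

theorem getD_eraseIdx (l : List Int) (i j : Nat) :
    (l.eraseIdx i).getD j 0 = if j < i then l.getD j 0 else l.getD (j + 1) 0 := by
  simp only [List.getD, List.getElem?_eraseIdx]
  split_ifs <;> rfl

theorem getD_concat_self (ys : List Int) (z : Int) : (ys ++ [z]).getD ys.length 0 = z := by
  simp [List.getD]

theorem getD_append_left (ys : List Int) (z : Int) (t : Nat) (h : t < ys.length) :
    (ys ++ [z]).getD t 0 = ys.getD t 0 := by
  simp [List.getD, List.getElem?_append_left h]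

-- index mapping of one rotate+delete step
theorem map_index (ys : List Int) (z k j : Int)
    (hk1 : 1 ≤ k) (hk2 : k ≤ (ys.length : Int) + 1)
    (hj0 : 0 ≤ j) (hj1 : j < (ys.length : Int)) :
    PySem.List.pyGetD ((z :: ys).eraseIdx ((z :: ys).length - k.toNat)) j 0
      = PySem.List.pyGetD (ys ++ [z]) (altStep j ((ys.length : Int) + 1, k)) 0 := by
  simp only [List.length_cons]
  by_cases hc : j < (ys.length : Int) + 1 - k
  · by_cases hz : j = 0
    · subst hz
      have hstep : altStep 0 ((ys.length : Int) + 1, k) = (ys.length : Int) := by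
        simp only [altStep]
        split_ifs <;> omega
      rw [hstep, pyGetD_toNat _ _ le_rfl, pyGetD_toNat _ _ (by omega)]
      rw [getD_eraseIdx, if_pos (by omega)]
      have ht : ((ys.length : Int)).toNat = ys.length := by omega
      rw [ht, Int.toNat_zero, List.getD_cons_zero, getD_concat_self]
    · have hstep : altStep j ((ys.length : Int) + 1, k) = j - 1 := by
        simp only [altStep]
        split_ifs
        all_goals omega
      rw [hstep, pyGetD_toNat _ _ hj0, pyGetD_toNat _ _ (by omega)]
      rw [getD_eraseIdx, if_pos (by omega)]
      have ht1 : j.toNat = (j.toNat - 1) + 1 := by omega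
      rw [ht1, List.getD_cons_succ]
      have ht2 : (j - 1).toNat = j.toNat - 1 := by omega
      rw [ht2, getD_append_left _ _ _ (by omega)]
  · have hstep : altStep j ((ys.length : Int) + 1, k) = j := by
      simp only [altStep]
      rw [if_neg (by omega), if_neg (by omega)]
      omega
    rw [hstep, pyGetD_toNat _ _ hj0, pyGetD_toNat _ _ hj0]
    rw [getD_eraseIdx, if_neg (by omega), List.getD_cons_succ]
    rw [getD_append_left _ _ _ (by omega)]

-- main invariant: the loop's front element is the original element at index posR
theorem loop_main (m : Nat) : ∀ (arr : List Int) (k : Int), arr.length = m →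
    1 ≤ k → k ≤ (arr.length : Int) → 1 ≤ arr.length →
    PySem.List.pyGetD (rotateDeleteLoop arr k) 0 0 =
      PySem.List.pyGetD arr (posR (arr.length : Int) k) 0 := by
  induction m using Nat.strong_induction_on with
  | _ m ih =>
    intro arr k hm hk1 hk2 hlen
    by_cases hgt : arr.length > 1
    · rcases List.eq_nil_or_concat arr with h0 | ⟨ys, z, hysz⟩
      · rw [h0] at hgt; simp at hgt
      rw [List.concat_eq_append] at hysz
      subst hysz
      have hys : 1 ≤ ys.length := by
        simp only [List.length_append, List.length_cons, List.length_nil] at hgt; omega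
      have hn : (((ys ++ [z]).length : Nat) : Int) = (ys.length : Int) + 1 := by simp
      have hk2' : k ≤ (ys.length : Int) + 1 := by rw [hn] at hk2; exact hk2
      rw [rotateDeleteLoop, dif_pos hgt]
      simp only [PySem.List.pop?_last, Option.getD_some, insert_zero]
      rw [pop?_neg (z :: ys) k hk1 (by simp only [List.length_cons]; omega)]
      simp only [Option.getD_some]
      have hL2 : ((z :: ys).eraseIdx ((z :: ys).length - k.toNat)).length = ys.length := by
        rw [List.length_eraseIdx]
        simp only [List.length_cons]
        rw [if_pos (by omega)]
        omega
      rw [hn, posR, dif_pos (by omega), hL2]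
      by_cases hb : k + 1 > (ys.length : Int)
      · rw [if_pos hb, if_pos (by omega)]
        exact map_index ys z k 0 hk1 hk2' le_rfl (by omega)
      · rw [if_neg hb, if_neg (by omega)]
        have hrec := ih ys.length (by simp only [List.length_append, List.length_cons, List.length_nil] at hm; omega)
          ((z :: ys).eraseIdx ((z :: ys).length - k.toNat)) (k + 1)
          hL2 (by omega) (by rw [hL2]; omega) (by rw [hL2]; omega)
        rw [hrec, hL2]
        have he : ((ys.length : Int) + 1) - 1 = (ys.length : Int) := by omega
        rw [he]
        have hjr := posR_range (ys.length : Int) (k + 1) (by omega)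
        exact map_index ys z k _ hk1 hk2' hjr.1 hjr.2
    · rw [rotateDeleteLoop, dif_neg hgt, posR, dif_neg (by omega)]

-- ===== VERDICT (by name: the statement is the Claim_ definition above) =====
theorem rotateDelete_spec : Claim_equal_rotateDelete := by
  intro arr _ hpre
  have hne : arr.length ≠ 0 := by simpa [List.length_eq_zero_iff] using hpre
  unfold Spec_rotateDelete rotateDelete
  simp only [rotateDelete_alt]
  rw [altChain_foldl]
  exact loop_main arr.length arr 1 rfl (by omega) (by omega) (by omega)
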